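-- pv_equiv track=rewrite | github.com/demjanp/deposit | store/Query/Parse.py | find_quotes
-- ===== SOURCE A (Python) =====
-- def find_quotes(qry):
-- 	# returns eval_str, quotes
-- 	# eval_str = "[text] %(q0)s [text] %(q1)s [text]"
-- 	# quotes = {"q0": "[text]", "q1": "[text]", ...}
--
-- 	evals = []
-- 	quotes = {}
-- 	q = 0
-- 	i0 = 0
-- 	to_find = None
-- 	for i in range(len(qry)):
-- 		if qry[i] == to_find:
-- 			quotes["q%d" % q] = qry[i0:i]
-- 			q += 1
-- 			i0 = i + 1
-- 			to_find = None
-- 		elif qry[i] == "\"":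
-- 			evals.append(qry[i0:i])
-- 			i0 = i + 1
-- 			to_find = qry[i]
-- 		elif i == len(qry) - 1:
-- 			evals.append(qry[i0:])
--
-- 	eval_str = ""
-- 	for i, ev in enumerate(evals):
-- 		eval_str += ev
-- 		if i < len(quotes):
-- 			eval_str += "%%(q%d)s" % i
--
-- 	return eval_str, quotes
-- ===== SOURCE B (Python) =====
-- def find_quotes(qry):
-- 	# split once on '"': odd-indexed parts that are followed by another part
-- 	# are completed quotes; everything else stays literal in the template
-- 	parts = qry.split('"')
-- 	quotes = {"q%d" % i: parts[2 * i + 1] for i in range((len(parts) - 1) // 2)}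
-- 	pieces = ["%%(q%d)s" % (j // 2) if j % 2 == 1 and j + 1 < len(parts) else p
-- 	          for j, p in enumerate(parts)]
-- 	return "".join(pieces), quotes
-- ===== Notes on version B (the rewrite author's own statement) =====
-- stated objective: simpler
-- what changed: Replaces the stateful character-by-character scan (quote-mode flag, slice bookkeeping, last-index special case) with a single str.split on the double-quote character followed by comprehensions: odd-indexed parts that have a following part become the quotes dict and placeholders, everything else stays literal.
import Mathlib
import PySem

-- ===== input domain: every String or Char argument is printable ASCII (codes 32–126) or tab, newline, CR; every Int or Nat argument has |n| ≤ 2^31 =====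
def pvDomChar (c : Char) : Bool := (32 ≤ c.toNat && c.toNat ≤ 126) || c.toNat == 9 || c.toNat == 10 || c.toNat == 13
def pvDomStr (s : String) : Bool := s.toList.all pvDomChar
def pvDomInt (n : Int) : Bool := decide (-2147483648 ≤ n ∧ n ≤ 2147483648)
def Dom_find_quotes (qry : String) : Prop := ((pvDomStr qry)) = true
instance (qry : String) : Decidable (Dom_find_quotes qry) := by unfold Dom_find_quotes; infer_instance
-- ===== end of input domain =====

-- B replaces A's stateful character scan with one split on the double-quote character plus
-- comprehensions (simpler; a timing run also measured it faster by a constant factor).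

-- ===== PORT A =====
-- "q%d" % q
def keyChars (q : Int) : List Char := 'q' :: PySem.Int.toChars q
-- "%%(q%d)s" % i  (after the %-formatting: "%(q<i>)s")
def phChars (i : Int) : List Char := '%' :: '(' :: 'q' :: (PySem.Int.toChars i ++ [')', 's'])

-- loop body of A's `for i in range(len(qry))`; state = (evals, quotes, q, i0, to_find)
def stepA (cs : List Char)
    (st : List (List Char) × PySem.Dict (List Char) (List Char) × Int × Int × Option Char)
    (i : Int) :
    List (List Char) × PySem.Dict (List Char) (List Char) × Int × Int × Option Char :=
  match st with
  | (evals, quotes, q, i0, tf) =>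
    let c := PySem.List.pyGetD cs i ' '
    if tf == some c then
      (evals, quotes.insert (keyChars q) (PySem.List.slice cs (some i0) (some i)), q + 1, i + 1, none)
    else if c == '"' then
      (evals ++ [PySem.List.slice cs (some i0) (some i)], quotes, q, i + 1, some c)
    else if i == (cs.length : Int) - 1 then
      (evals ++ [PySem.List.slice cs (some i0) none], quotes, q, i0, tf)
    else
      (evals, quotes, q, i0, tf)

def find_quotes (qry : String) : String × (List (String × String)) :=
  let cs := qry.toList
  let st := (PySem.List.pyRange 0 (cs.length : Int) 1).foldl (stepA cs)
      (([] : List (List Char)), (PySem.Dict.empty : PySem.Dict (List Char) (List Char)),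
       (0 : Int), (0 : Int), (none : Option Char))
  let evals := st.1
  let quotes := st.2.1
  let eval_str := (PySem.List.enumerate evals 0).foldl
      (fun s p => let s2 := s ++ p.2; if p.1 < (quotes.size : Int) then s2 ++ phChars p.1 else s2)
      ([] : List Char)
  (String.ofList eval_str, quotes.items.map (fun kv => (String.ofList kv.1, String.ofList kv.2)))

-- ===== PORT B =====
def find_quotes_alt (qry : String) : String × (List (String × String)) :=
  let parts := qry.toList.splitOn '"'
  let nq := PySem.Int.floordiv ((parts.length : Int) - 1) 2
  let quotes := (PySem.List.pyRange 0 nq 1).foldl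
      (fun d i => d.insert (keyChars i) (PySem.List.pyGetD parts (2 * i + 1) []))
      (PySem.Dict.empty : PySem.Dict (List Char) (List Char))
  let pieces := (PySem.List.enumerate parts 0).map
      (fun jp => if PySem.Int.mod jp.1 2 == 1 && jp.1 + 1 < (parts.length : Int)
                 then phChars (PySem.Int.floordiv jp.1 2) else jp.2)
  (String.ofList (PySem.Chars.join [] pieces),
   quotes.items.map (fun kv => (String.ofList kv.1, String.ofList kv.2)))

-- ===== PRECONDITION & SPEC =====
def Spec_find_quotes (qry : String) (out : String × (List (String × String))) : Prop := out = find_quotes_alt qry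
instance (qry : String) (out : String × (List (String × String))) : Decidable (Spec_find_quotes qry out) := by unfold Spec_find_quotes; infer_instance

-- ===== CLAIM (what is proved, stated in full; the proofs are below) =====
def Claim_equal_find_quotes : Prop := ∀ (qry : String), Dom_find_quotes qry → Spec_find_quotes qry (find_quotes qry)

-- ===== LEMMAS AND PROOFS =====

-- ---------- proof-side helper definitions ----------

def fst3 (st : List (List Char) × PySem.Dict (List Char) (List Char) × Int × Int × Option Char) :
    List (List Char) × PySem.Dict (List Char) (List Char) × Int :=
  (st.1, st.2.1, st.2.2.1)

-- structural form of A's scanning loop (pending = text since the last cut)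
def scanA (ev : List (List Char)) (qt : PySem.Dict (List Char) (List Char)) (q : Int)
    (pending : List Char) (tf : Option Char) :
    List Char → List (List Char) × PySem.Dict (List Char) (List Char) × Int
  | [] => (ev, qt, q)
  | [c] =>
    if tf == some c then (ev, qt.insert (keyChars q) pending, q + 1)
    else if c == '"' then (ev ++ [pending], qt, q)
    else (ev ++ [pending ++ [c]], qt, q)
  | c :: c2 :: rs =>
    if tf == some c then scanA ev (qt.insert (keyChars q) pending) (q + 1) [] none (c2 :: rs)
    else if c == '"' then scanA (ev ++ [pending]) qt q [] (some c) (c2 :: rs)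
    else scanA ev qt q (pending ++ [c]) tf (c2 :: rs)

-- structural recursion computing split on '"'
def partsFn : List Char → List (List Char)
  | [] => [[]]
  | c :: rest => if c = '"' then [] :: partsFn rest else (partsFn rest).modifyHead (c :: ·)

-- A's evals, read off the parts list (scan starting outside a quote)
def evalsOf : List (List Char) → List (List Char)
  | [] => []
  | [p] => if p = [] then [] else [p]
  | [p, l] => p :: (if l = [] then [] else [l])
  | p :: _ :: r :: rs => p :: evalsOf (r :: rs)

-- A's evals when the scan starts inside a quote
def evalsOfIn : List (List Char) → List (List Char)
  | [] => []
  | [u] => if u = [] then [] else [u]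
  | _ :: r :: rs => evalsOf (r :: rs)

-- the completed quote contents, read off the parts list
def qvals : List (List Char) → List (List Char)
  | _ :: v :: r :: rs => v :: qvals (r :: rs)
  | _ => []

def qvalsIn : List (List Char) → List (List Char)
  | v :: r :: rs => v :: qvals (r :: rs)
  | _ => []

-- insert the quote values with keys q, q+1, ...
def insQuotes (d : PySem.Dict (List Char) (List Char)) (q : Int) :
    List (List Char) → PySem.Dict (List Char) (List Char)
  | [] => d
  | v :: vs => insQuotes (d.insert (keyChars q) v) (q + 1) vs

-- A's final join: each eval, followed by a placeholder while the index is below Q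
def interleave (Q k : Int) : List (List Char) → List Char
  | [] => []
  | ev :: rest => ev ++ (if k < Q then phChars k else []) ++ interleave Q (k + 1) rest

-- B's pieces list, read off the parts list
def piecesFn (k : Int) : List (List Char) → List (List Char)
  | [] => []
  | [p] => [p]
  | p :: v :: rs => if rs = [] then [p, v] else p :: phChars k :: piecesFn (k + 1) rs

-- ---------- key injectivity ----------

theorem digitChar_inj : ∀ a < 10, ∀ b < 10, Nat.digitChar a = Nat.digitChar b → a = b := by decide

theorem toDigits10_inj (a : Nat) : ∀ b : Nat, Nat.toDigits 10 a = Nat.toDigits 10 b → a = b := by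
  induction a using Nat.strong_induction_on with
  | _ a ih =>
    intro b h
    by_cases h1 : a < 10 <;> by_cases h2 : b < 10
    · rw [Nat.toDigits_of_lt_base h1, Nat.toDigits_of_lt_base h2] at h
      exact digitChar_inj a h1 b h2 (by simpa using h)
    · rw [Nat.toDigits_of_lt_base h1, Nat.toDigits_eq_if (n := b) (by omega), if_neg h2] at h
      have hl := congrArg List.length h
      have := Nat.length_toDigits_pos (b := 10) (n := b / 10)
      simp only [List.length_cons, List.length_nil, List.length_append] at hl
      omega
    · rw [Nat.toDigits_of_lt_base h2, Nat.toDigits_eq_if (n := a) (by omega), if_neg h1] at h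
      have hl := congrArg List.length h
      have := Nat.length_toDigits_pos (b := 10) (n := a / 10)
      simp only [List.length_cons, List.length_nil, List.length_append] at hl
      omega
    · rw [Nat.toDigits_eq_if (n := a) (by omega), if_neg h1, Nat.toDigits_eq_if (n := b) (by omega), if_neg h2,
         ← List.concat_eq_append, ← List.concat_eq_append] at h
      obtain ⟨hd, he⟩ := List.concat_inj.mp h
      have hdiv : a / 10 = b / 10 := ih (a / 10) (Nat.div_lt_self (by omega) (by omega)) _ hd
      have hmod : a % 10 = b % 10 :=
        digitChar_inj (a % 10) (Nat.mod_lt _ (by omega)) (b % 10) (Nat.mod_lt _ (by omega)) he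
      omega

theorem keyChars_inj {a b : Int} (ha : 0 ≤ a) (hb : 0 ≤ b) (h : keyChars a = keyChars b) : a = b := by
  simp only [keyChars, List.cons.injEq, true_and] at h
  rw [PySem.Int.toChars, PySem.Int.toChars, if_neg (by omega), if_neg (by omega)] at h
  have := toDigits10_inj a.toNat b.toNat h
  omega

-- ---------- parts ----------

theorem splitOn_eq_partsFn (cs : List Char) : cs.splitOn '"' = partsFn cs := by
  induction cs with
  | nil => simp [List.splitOn, List.splitOnP_nil, partsFn]
  | cons c r ih =>
    simp only [List.splitOn] at *
    rw [List.splitOnP_cons]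
    by_cases hc : c = '"' <;> simp [partsFn, hc, ih]

theorem partsFn_ne_nil (cs : List Char) : partsFn cs ≠ [] := by
  induction cs with
  | nil => simp [partsFn]
  | cons c r ih =>
    rw [partsFn]
    split
    · simp
    · cases h : partsFn r with
      | nil => exact absurd h ih
      | cons a t => simp

theorem evalsOf_cons (p : List Char) (more : List (List Char)) (h : more ≠ []) :
    evalsOf (p :: more) = p :: evalsOfIn more := by
  match more, h with
  | [l], _ => simp [evalsOf, evalsOfIn]
  | v :: r :: rs, _ => simp [evalsOf, evalsOfIn]

theorem qvals_cons (p : List Char) (more : List (List Char)) (h : more ≠ []) :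
    qvals (p :: more) = qvalsIn more := by
  match more, h with
  | [l], _ => simp [qvals, qvalsIn]
  | v :: r :: rs, _ => simp [qvals, qvalsIn]

-- ---------- A's indexed loop equals the structural scan ----------

theorem A_run (cs : List Char) (rest : List Char) :
    ∀ (i i0 : Nat), i0 ≤ i → List.drop i cs = rest →
    ∀ ev qt q tf,
    fst3 ((PySem.List.pyRange (i : Int) (cs.length : Int) 1).foldl (stepA cs) (ev, qt, q, (i0 : Int), tf))
      = scanA ev qt q (List.take (i - i0) (List.drop i0 cs)) tf rest := by
  match rest with
  | [] =>
    intro i i0 hle hdrop ev qt q tf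
    have hlen : cs.length ≤ i := List.drop_eq_nil_iff.mp hdrop
    rw [PySem.List.pyRange_one_eq_nil (by exact_mod_cast hlen)]
    simp [fst3, scanA]
  | c :: rest' =>
    intro i i0 hle hdrop ev qt q tf
    have hi : i < cs.length := by
      by_contra hcon
      rw [List.drop_eq_nil_iff.mpr (by omega)] at hdrop
      cases hdrop
    have hget : cs[i]? = some c := by
      have h0 : (List.drop i cs)[0]? = some c := by rw [hdrop]; rfl
      rw [List.getElem?_drop] at h0
      simpa using h0
    have hc : PySem.List.pyGetD cs (i : Int) ' ' = c := by
      rw [PySem.List.pyGetD_natCast, List.getD_eq_getElem?_getD, hget]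
      rfl
    have hdrop' : List.drop (i + 1) cs = rest' := by
      have h1 : List.drop (i + 1) cs = List.drop 1 (List.drop i cs) := by
        rw [List.drop_drop]
      rw [h1, hdrop]
      rfl
    have hpend : List.take (i + 1 - i0) (List.drop i0 cs) = List.take (i - i0) (List.drop i0 cs) ++ [c] := by
      have h2 : i + 1 - i0 = (i - i0) + 1 := by omega
      rw [h2, List.take_succ, List.getElem?_drop]
      have h3 : i0 + (i - i0) = i := by omega
      rw [h3, hget]
      rfl
    rw [PySem.List.pyRange_one_cons (by exact_mod_cast hi), List.foldl_cons]
    simp only [stepA, hc]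
    by_cases h1 : tf == some c
    · simp only [h1, if_true]
      have hcast : (i : Int) + 1 = ((i + 1 : Nat) : Int) := by push_cast; ring
      rw [hcast, A_run cs rest' (i + 1) (i + 1) (le_refl _) hdrop', PySem.List.slice_natCast]
      simp only [Nat.sub_self, List.take_zero]
      cases rest' <;> simp [scanA, h1]
    · simp only [h1, Bool.false_eq_true, if_false]
      by_cases h2 : c == '"'
      · simp only [h2, if_true]
        have hcast : (i : Int) + 1 = ((i + 1 : Nat) : Int) := by push_cast; ring
        rw [hcast, A_run cs rest' (i + 1) (i + 1) (le_refl _) hdrop', PySem.List.slice_natCast]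
        simp only [Nat.sub_self, List.take_zero]
        cases rest' <;> simp [scanA, h1, h2]
      · simp only [h2, Bool.false_eq_true, if_false]
        by_cases h3 : (i : Int) == (cs.length : Int) - 1
        · have hlast : i + 1 = cs.length := by
            have := beq_iff_eq.mp h3
            omega
          have hrest' : rest' = [] := by
            have hl := congrArg List.length hdrop
            simp at hl
            exact List.eq_nil_of_length_eq_zero (by omega)
          subst hrest'
          simp only [h3, if_true]
          rw [PySem.List.pyRange_one_eq_nil (by exact_mod_cast le_of_eq hlast.symm)]
          have htail : List.drop (i - i0) (List.drop i0 cs) = [c] := by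
            rw [List.drop_drop]
            have h4 : i0 + (i - i0) = i := by omega
            rw [h4, hdrop]
          have hsplit : List.drop i0 cs = List.take (i - i0) (List.drop i0 cs) ++ [c] := by
            conv_lhs => rw [← List.take_append_drop (i - i0) (List.drop i0 cs)]
            rw [htail]
          rw [PySem.List.slice_from_natCast]
          simp only [List.foldl_nil, fst3, scanA, h1, Bool.false_eq_true, if_false, h2]
          conv_lhs => rw [hsplit]
        · have hrest' : rest' ≠ [] := by
            intro hnil
            have hl := congrArg List.length hdrop
            rw [hnil] at hl
            simp at hl
            have : (i : Int) = (cs.length : Int) - 1 := by omega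
            exact h3 (beq_iff_eq.mpr this)
          simp only [Bool.not_eq_true] at h3
          simp only [h3, Bool.false_eq_true, if_false]
          have hcast : (i : Int) + 1 = ((i + 1 : Nat) : Int) := by push_cast; ring
          rw [hcast, A_run cs rest' (i + 1) i0 (by omega) hdrop', hpend]
          obtain ⟨r, rs, hrr⟩ : ∃ r rs, rest' = r :: rs := by
            cases rest' with
            | nil => exact absurd rfl hrest'
            | cons r rs => exact ⟨r, rs, rfl⟩
          subst hrr
          simp [scanA, h1, h2]
  termination_by rest.length
  decreasing_by all_goals (simp only [List.length_cons]; omega)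

-- mode-dependent selectors (mode = true: scanning inside a quote)
def evalsM (mode : Bool) (P : List (List Char)) : List (List Char) :=
  if mode then evalsOfIn P else evalsOf P
def qvalsM (mode : Bool) (P : List (List Char)) : List (List Char) :=
  if mode then qvalsIn P else qvals P

theorem scan_parts (rest : List Char) :
    ∀ (pending : List Char) (ev : List (List Char)) (qt : PySem.Dict (List Char) (List Char))
      (q : Int) (mode : Bool),
    (mode = true → rest ≠ []) → (mode = false → rest = [] → pending = []) →
    scanA ev qt q pending (if mode then some '"' else none) rest =
      (ev ++ evalsM mode ((partsFn rest).modifyHead (pending ++ ·)),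
       insQuotes qt q (qvalsM mode ((partsFn rest).modifyHead (pending ++ ·))),
       q + ((qvalsM mode ((partsFn rest).modifyHead (pending ++ ·))).length : Int)) := by
  match rest with
  | [] =>
    intro pending ev qt q mode hm hp
    cases mode with
    | true => exact absurd rfl (hm rfl)
    | false =>
      have := hp rfl rfl
      subst this
      simp [scanA, partsFn, evalsM, qvalsM, evalsOf, qvals, insQuotes]
  | [c] =>
    intro pending ev qt q mode hm hp
    by_cases hc : c = '"'
    · subst hc
      cases mode <;>
        simp [scanA, partsFn, evalsM, qvalsM, evalsOf, evalsOfIn, qvals, qvalsIn, insQuotes]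
    · have hc' : ('"' == c) = false := beq_eq_false_iff_ne.mpr (Ne.symm hc)
      have hc'' : (c == '"') = false := beq_eq_false_iff_ne.mpr hc
      cases mode <;>
        simp [scanA, partsFn, evalsM, qvalsM, evalsOf, evalsOfIn, qvals, qvalsIn, insQuotes,
              hc, hc', hc'']
  | c :: c2 :: rs =>
    intro pending ev qt q mode hm hp
    have hne := partsFn_ne_nil (c2 :: rs)
    obtain ⟨m, ms, hms⟩ : ∃ m ms, partsFn (c2 :: rs) = m :: ms := by
      cases h : partsFn (c2 :: rs) with
      | nil => exact absurd h hne
      | cons m ms => exact ⟨m, ms, rfl⟩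
    have hid : (partsFn (c2 :: rs)).modifyHead (([] : List Char) ++ ·) = partsFn (c2 :: rs) := by
      have h0 : (fun x : List Char => [] ++ x) = id := funext fun x => by simp
      rw [h0, List.modifyHead_id, id_eq]
    have hparts_q : partsFn ('"' :: c2 :: rs) = [] :: partsFn (c2 :: rs) := by
      rw [partsFn]; simp
    by_cases hc : c = '"'
    · subst hc
      cases mode with
      | false =>
        -- opening quote
        have hrec := scan_parts (c2 :: rs) [] (ev ++ [pending]) qt q true
          (fun _ => by simp) (fun h => by cases h)
        rw [hid] at hrec
        simp only [if_true] at hrec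
        rw [hms] at hrec
        have h0 : ((none : Option Char) == some '"') = false := rfl
        simp only [scanA, h0, Bool.false_eq_true, if_false, beq_self_eq_true, if_true]
        rw [hrec, hparts_q, List.modifyHead_cons, List.append_nil, hms]
        simp [evalsM, qvalsM,
              evalsOf_cons pending (m :: ms) (List.cons_ne_nil m ms),
              qvals_cons pending (m :: ms) (List.cons_ne_nil m ms)]
      | true =>
        -- closing quote
        have hrec := scan_parts (c2 :: rs) [] ev (qt.insert (keyChars q) pending) (q + 1) false
          (fun h => by cases h) (fun _ _ => rfl)
        rw [hid] at hrec
        simp only [Bool.false_eq_true, if_false] at hrec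
        rw [hms] at hrec
        have h0 : ((some '"' : Option Char) == some '"') = true := rfl
        simp only [scanA, h0, if_true]
        rw [hrec, hparts_q, List.modifyHead_cons, List.append_nil, hms]
        refine Prod.ext ?_ (Prod.ext ?_ ?_)
        · simp [evalsM, evalsOfIn]
        · simp [qvalsM, qvalsIn, insQuotes]
        · simp [qvalsM, qvalsIn]
          push_cast
          ring
    · have hc'' : (c == '"') = false := beq_eq_false_iff_ne.mpr hc
      have hc' : ('"' == c) = false := beq_eq_false_iff_ne.mpr (Ne.symm hc)
      have hparts_c : partsFn (c :: c2 :: rs) = (partsFn (c2 :: rs)).modifyHead (c :: ·) := by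
        rw [partsFn]; simp [hc]
      have hfun : ((fun x : List Char => pending ++ x) ∘ (fun x : List Char => c :: x))
          = (fun x : List Char => (pending ++ [c]) ++ x) := funext fun x => by simp
      cases mode with
      | false =>
        have hrec := scan_parts (c2 :: rs) (pending ++ [c]) ev qt q false
          (fun h => by cases h) (fun _ h => by simp at h)
        simp only [Bool.false_eq_true, if_false] at hrec
        have h0 : ((none : Option Char) == some c) = false := rfl
        simp only [scanA, h0, hc'', Bool.false_eq_true, if_false]
        rw [hrec, hparts_c, List.modifyHead_modifyHead, hfun]
      | true =>
        have hrec := scan_parts (c2 :: rs) (pending ++ [c]) ev qt q true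
          (fun _ => by simp) (fun h => by cases h)
        simp only [if_true] at hrec
        have h0 : ((some '"' : Option Char) == some c) = false := by simpa using hc'
        simp only [scanA, if_true, h0, hc'', Bool.false_eq_true, if_false]
        rw [hrec, hparts_c, List.modifyHead_modifyHead, hfun]
  termination_by rest.length
  decreasing_by all_goals (simp only [List.length_cons]; omega)

-- ---------- the quotes dict ----------

theorem size_insQuotes : ∀ (vals : List (List Char)) (q : Int) (d : PySem.Dict (List Char) (List Char)),
    0 ≤ q → (∀ j : Int, q ≤ j → d.contains (keyChars j) = false) →
    (insQuotes d q vals).size = d.size + vals.length := by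
  intro vals
  induction vals with
  | nil => intro q d hq hf; simp [insQuotes]
  | cons v vs ih =>
    intro q d hq hf
    rw [insQuotes]
    rw [ih (q + 1) _ (by omega) ?fresh]
    · have hitems := PySem.Dict.items_insert_of_not_contains d v (hf q (le_refl q))
      simp [PySem.Dict.size, hitems]
      omega
    case fresh =>
      intro j hj
      rw [PySem.Dict.contains_insert]
      have h1 : (keyChars j == keyChars q) = false := by
        rw [beq_eq_false_iff_ne]
        intro heq
        have := keyChars_inj (by omega) hq heq
        omega
      rw [h1, hf j (by omega)]
      rfl

theorem qvals_eq (parts : List (List Char)) :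
    qvals parts = (List.range ((parts.length - 1) / 2)).map (fun i => parts.getD (2 * i + 1) []) := by
  match parts with
  | [] => simp [qvals]
  | [p] => simp [qvals]
  | [p, v] => simp [qvals]
  | p :: v :: r :: rs =>
    have ih := qvals_eq (r :: rs)
    rw [qvals, ih]
    have hlen : ((p :: v :: r :: rs).length - 1) / 2 = ((r :: rs).length - 1) / 2 + 1 := by
      simp [List.length_cons]
      omega
    rw [hlen, List.range_succ_eq_map]
    simp only [List.map_cons, List.map_map]
    constructor
  termination_by parts.length

theorem foldB_quotes (parts : List (List Char)) :
    ∀ (k q : Nat) (d : PySem.Dict (List Char) (List Char)),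
    (PySem.List.pyRange (q : Int) ((q : Int) + (k : Int)) 1).foldl
      (fun d i => d.insert (keyChars i) (PySem.List.pyGetD parts (2 * i + 1) [])) d
    = insQuotes d q ((List.range k).map (fun j => parts.getD (2 * (q + j) + 1) [])) := by
  intro k
  induction k with
  | zero =>
    intro q d
    rw [PySem.List.pyRange_one_eq_nil (by push_cast; omega)]
    simp [insQuotes]
  | succ k ih =>
    intro q d
    rw [PySem.List.pyRange_one_cons (by push_cast; omega), List.foldl_cons]
    have hb : (q : Int) + ((k + 1 : Nat) : Int) = ((q + 1 : Nat) : Int) + (k : Int) := by push_cast; ring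
    have hq1 : (q : Int) + 1 = ((q + 1 : Nat) : Int) := by push_cast; ring
    rw [hb, hq1, ih (q + 1)]
    have h3 : 2 * (q : Int) + 1 = ((2 * q + 1 : Nat) : Int) := by push_cast; ring
    rw [h3, PySem.List.pyGetD_natCast]
    rw [List.range_succ_eq_map]
    simp only [List.map_cons, List.map_map, Nat.add_zero, insQuotes]
    rw [hq1]
    congr 1
    apply List.map_congr_left
    intro j hj
    simp only [Function.comp, Nat.succ_eq_add_one]
    congr 1
    omega

-- ---------- the template string ----------

theorem foldA_str (Q : Int) : ∀ (evals : List (List Char)) (s : List Char) (k : Int),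
    (PySem.List.enumerate evals k).foldl
      (fun s p => if p.1 < Q then s ++ p.2 ++ phChars p.1 else s ++ p.2) s
    = s ++ interleave Q k evals := by
  intro evals
  induction evals with
  | nil => intro s k; simp [PySem.List.enumerate_nil, interleave]
  | cons ev rest ih =>
    intro s k
    rw [PySem.List.enumerate_cons, List.foldl_cons]
    dsimp only
    rw [interleave]
    by_cases h : k < Q
    · rw [if_pos h, if_pos h, ih]
      simp [List.append_assoc]
    · rw [if_neg h, if_neg h, ih]
      simp [List.append_assoc]

theorem interleave_flatten (parts : List (List Char)) : ∀ (k : Int),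
    interleave (k + ((qvals parts).length : Int)) k (evalsOf parts) = (piecesFn k parts).flatten := by
  match parts with
  | [] => intro k; simp [qvals, evalsOf, interleave, piecesFn]
  | [p] =>
    intro k
    by_cases hp : p = [] <;> simp [qvals, evalsOf, interleave, piecesFn, hp]
  | [p, v] =>
    intro k
    by_cases hv : v = [] <;> simp [qvals, evalsOf, interleave, piecesFn, hv]
  | p :: v :: r :: rs =>
    intro k
    have ih := interleave_flatten (r :: rs) (k + 1)
    rw [qvals, evalsOf, piecesFn, if_neg (List.cons_ne_nil r rs)]
    rw [interleave]
    have hQ : k + (((v :: qvals (r :: rs)).length : Nat) : Int)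
        = (k + 1) + ((qvals (r :: rs)).length : Int) := by
      push_cast [List.length_cons]
      ring
    rw [hQ]
    rw [if_pos (by have := Int.natCast_nonneg (qvals (r :: rs)).length; omega)]
    rw [ih]
    simp [List.flatten_cons, List.append_assoc]
  termination_by parts.length

theorem piecesB (parts : List (List Char)) (rem : List (List Char)) :
    ∀ (k : Nat), 2 * k + rem.length = parts.length →
    (PySem.List.enumerate rem ((2 * k : Nat) : Int)).map
      (fun jp => if PySem.Int.mod jp.1 2 == 1 && jp.1 + 1 < (parts.length : Int)
                 then phChars (PySem.Int.floordiv jp.1 2) else jp.2)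
    = piecesFn ((k : Nat) : Int) rem := by
  match rem with
  | [] => intro k h; simp [PySem.List.enumerate_nil, piecesFn]
  | [p] =>
    intro k h
    rw [PySem.List.enumerate_cons, PySem.List.enumerate_nil]
    have hmod0 : PySem.Int.mod (2 * (k : Int)) 2 = 0 := by
      rw [PySem.Int.mod_eq_emod_of_pos (by norm_num)]
      omega
    simp [hmod0, piecesFn]
  | p :: v :: rest =>
    intro k h
    rw [PySem.List.enumerate_cons, PySem.List.enumerate_cons, List.map_cons, List.map_cons]
    have hmod0 : PySem.Int.mod (2 * (k : Int)) 2 = 0 := by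
      rw [PySem.Int.mod_eq_emod_of_pos (by norm_num)]
      omega
    have hmod1 : PySem.Int.mod (2 * (k : Int) + 1) 2 = 1 := by
      rw [PySem.Int.mod_eq_emod_of_pos (by norm_num)]
      omega
    have hdiv1 : PySem.Int.floordiv (2 * (k : Int) + 1) 2 = (k : Int) := by
      rw [PySem.Int.floordiv_eq_ediv_of_pos (by norm_num)]
      omega
    by_cases hr : rest = []
    · subst hr
      have hcond : ¬ (2 * (k : Int) + 1 + 1 < (parts.length : Int)) := by
        simp only [List.length_cons, List.length_nil] at h
        omega
      simp [PySem.List.enumerate_nil, hmod0, hmod1, hcond, piecesFn]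
    · have hcond : 2 * (k : Int) + 1 + 1 < (parts.length : Int) := by
        simp only [List.length_cons] at h
        have : rest.length ≠ 0 := fun h0 => hr (List.eq_nil_of_length_eq_zero h0)
        omega
      have hnext : ((2 * k : Nat) : Int) + 1 + 1 = ((2 * (k + 1) : Nat) : Int) := by push_cast; ring
      have ih := piecesB parts rest (k + 1) (by simp only [List.length_cons] at h; omega)
      rw [hnext, ih]
      have hk1 : ((k : Nat) : Int) + 1 = (((k + 1 : Nat)) : Int) := by push_cast; ring
      rw [piecesFn, if_neg hr, hk1]
      simp [hmod0, hmod1, hdiv1, hcond]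
      rw [if_pos (by omega : 2 * ((k : Int) + 1) < (parts.length : Int))]
      congr 1
  termination_by rem.length

theorem join_flatten (l : List (List Char)) : PySem.Chars.join [] l = l.flatten := by
  match l with
  | [] => simp [PySem.Chars.join_nil]
  | [p] => simp [PySem.Chars.join_singleton]
  | p :: q :: rest =>
    rw [PySem.Chars.join_cons_cons, join_flatten (q :: rest)]
    simp
  termination_by l.length

-- ===== VERDICT (by name: the statement is the Claim_ definition above) =====
theorem find_quotes_spec : Claim_equal_find_quotes := by
  unfold Claim_equal_find_quotes Spec_find_quotes
  intro qry _
  have hid0 : (fun x : List Char => [] ++ x) = id := funext fun x => by simp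
  have hpne := partsFn_ne_nil qry.toList
  have hlen1 : 1 ≤ (partsFn qry.toList).length := by
    cases h : partsFn qry.toList with
    | nil => exact absurd h hpne
    | cons a t => simp [h]
  -- A's loop, characterized
  have hA := A_run qry.toList qry.toList 0 0 (le_refl 0) (by simp) [] PySem.Dict.empty 0 none
  have hscan := scan_parts qry.toList [] [] PySem.Dict.empty 0 false (fun h => by cases h) (fun _ _ => rfl)
  simp only [Bool.false_eq_true, if_false, evalsM, qvalsM] at hscan
  rw [hid0, List.modifyHead_id, id_eq] at hscan
  simp only [Nat.cast_zero, Nat.sub_self, List.take_zero, List.drop_zero] at hA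
  rw [hscan] at hA
  simp only [List.nil_append, zero_add] at hA
  unfold fst3 at hA
  have h1 := congrArg Prod.fst hA
  have h2 := congrArg (fun t => t.2.1) hA
  dsimp only at h1 h2
  -- the quotes dict size
  have hsize : (insQuotes PySem.Dict.empty 0 (qvals (partsFn qry.toList))).size
      = (qvals (partsFn qry.toList)).length := by
    rw [size_insQuotes _ 0 _ (le_refl 0) (fun j _ => PySem.Dict.contains_empty _)]
    simp [PySem.Dict.size, PySem.Dict.empty]
  -- B's quotes dict
  have hnq : PySem.Int.floordiv (((partsFn qry.toList).length : Int) - 1) 2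
      = ((((partsFn qry.toList).length - 1) / 2 : Nat) : Int) := by
    rw [show (((partsFn qry.toList).length : Int) - 1) = (((partsFn qry.toList).length - 1 : Nat) : Int) by omega]
    exact_mod_cast PySem.Int.floordiv_natCast _ 2
  have hBq := foldB_quotes (partsFn qry.toList) (((partsFn qry.toList).length - 1) / 2) 0 PySem.Dict.empty
  simp only [Nat.cast_zero, zero_add, Nat.zero_add] at hBq
  rw [← qvals_eq] at hBq
  -- B's pieces
  have hBp := piecesB (partsFn qry.toList) (partsFn qry.toList) 0 (by simp)
  simp only [Nat.mul_zero, Nat.cast_zero] at hBp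
  -- A's template string
  have hstr := foldA_str (((qvals (partsFn qry.toList)).length : Nat) : Int)
      (evalsOf (partsFn qry.toList)) [] 0
  have hint := interleave_flatten (partsFn qry.toList) 0
  simp only [zero_add] at hint
  -- assemble
  simp only [find_quotes, find_quotes_alt, splitOn_eq_partsFn]
  rw [h1, h2, hsize, hnq, hBq, hBp, hstr, hint, join_flatten]
  simp
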